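-- pv_equiv track=rewrite | github.com/sczopek/A-B-Testing-Python-SQLite- | loanDadaTest.py | run_A_B_Test
-- ===== SOURCE A (Python) =====
-- def run_A_B_Test(treatmentSample, controlSample, N, testSuccessVal):
-- 	i=0
-- 	d=0
-- 	testSuccessCount=0
-- 	sampleSize = min(len(treatmentSample), len(controlSample))
-- 	while testSuccessCount<N and i<sampleSize:
-- 		#deal with the treatment group first
-- 		#if loan_status = "Charged Off":
-- 		if treatmentSample[i] == testSuccessVal:
-- 			testSuccessCount+=1
-- 			d+=1
--
-- 		#now deal with the control group
-- 		#if loan_status = "Charged Off":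
-- 		if controlSample[i] == testSuccessVal:
-- 			testSuccessCount+=1
-- 			d-=1
-- 		i+=1
--
-- 	return d, testSuccessCount
-- ===== SOURCE B (Python) =====
-- def run_A_B_Test(treatmentSample, controlSample, N, testSuccessVal):
--     n = min(len(treatmentSample), len(controlSample))
--     # per-index contribution pairs
--     succ = [(treatmentSample[i] == testSuccessVal) + (controlSample[i] == testSuccessVal)
--             for i in range(n)]
--     diff = [(treatmentSample[i] == testSuccessVal) - (controlSample[i] == testSuccessVal)
--             for i in range(n)]
--     if N <= 0:
--         return 0, 0
--     # cumulative success counts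
--     cum = []
--     s = 0
--     for x in succ:
--         s += x
--         cum.append(s)
--     # first index whose cumulative count reaches N: include indices 0..k
--     for k in range(n):
--         if cum[k] >= N:
--             return sum(diff[:k + 1]), cum[k]
--     # threshold never reached: totals over all indices
--     return sum(diff), s
-- ===== Notes on version B (the rewrite author's own statement) =====
-- stated objective: alternative
-- what changed: Replaces the single stateful while-loop with a data-flow decomposition: per-index success/diff contribution lists are built first, cumulative success counts computed, then the first index reaching N is located and the answer read off as a prefix sum of the diff list.
import Mathlib
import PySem

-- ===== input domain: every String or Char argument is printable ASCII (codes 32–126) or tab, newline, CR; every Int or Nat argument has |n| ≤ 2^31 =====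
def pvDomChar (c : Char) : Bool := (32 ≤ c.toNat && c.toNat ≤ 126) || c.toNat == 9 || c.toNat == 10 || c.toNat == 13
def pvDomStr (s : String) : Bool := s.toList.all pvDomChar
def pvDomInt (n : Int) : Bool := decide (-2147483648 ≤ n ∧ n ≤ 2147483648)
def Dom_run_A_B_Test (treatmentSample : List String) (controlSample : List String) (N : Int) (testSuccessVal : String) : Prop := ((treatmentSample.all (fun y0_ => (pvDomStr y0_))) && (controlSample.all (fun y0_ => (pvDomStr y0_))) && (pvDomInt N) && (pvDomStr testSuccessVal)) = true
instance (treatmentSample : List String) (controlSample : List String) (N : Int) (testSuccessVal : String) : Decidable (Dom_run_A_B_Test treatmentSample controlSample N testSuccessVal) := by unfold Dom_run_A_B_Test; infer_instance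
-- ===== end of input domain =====

-- B replaces A's single stateful while-loop by a data-flow decomposition (contribution
-- lists → cumulative counts → first index reaching N → prefix sums); same cost, alternative structure.

-- ===== PORT A =====
-- the while loop: state (i, d, testSuccessCount); indices are in range whenever read
def runA_loop (treatmentSample controlSample : List String) (N : Int) (testSuccessVal : String)
    (sampleSize i : Nat) (d cnt : Int) : Int × Int :=
  if h : cnt < N ∧ i < sampleSize then
    let d1 := if treatmentSample.getD i "" = testSuccessVal then d + 1 else d
    let c1 := if treatmentSample.getD i "" = testSuccessVal then cnt + 1 else cnt
    let d2 := if controlSample.getD i "" = testSuccessVal then d1 - 1 else d1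
    let c2 := if controlSample.getD i "" = testSuccessVal then c1 + 1 else c1
    runA_loop treatmentSample controlSample N testSuccessVal sampleSize (i + 1) d2 c2
  else (d, cnt)
termination_by sampleSize - i
decreasing_by omega

def run_A_B_Test (treatmentSample : List String) (controlSample : List String) (N : Int) (testSuccessVal : String) : Int × Int :=
  runA_loop treatmentSample controlSample N testSuccessVal
    (min treatmentSample.length controlSample.length) 0 0 0

-- ===== PORT B =====
-- per-index contributions
def altS (treatmentSample controlSample : List String) (testSuccessVal : String) (i : Nat) : Int :=
  (if treatmentSample.getD i "" = testSuccessVal then 1 else 0) +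
  (if controlSample.getD i "" = testSuccessVal then 1 else 0)

def altD (treatmentSample controlSample : List String) (testSuccessVal : String) (i : Nat) : Int :=
  (if treatmentSample.getD i "" = testSuccessVal then 1 else 0) -
  (if controlSample.getD i "" = testSuccessVal then 1 else 0)

-- running cumulative sums (the `for x in succ` loop building `cum`)
def altCum : List Int → Int → List Int
  | [], _ => []
  | x :: xs, s => (s + x) :: altCum xs (s + x)

-- the `for k in range(n)` search loop with its fallback totals
def altFind (cum diff : List Int) (N fd fs : Int) : List Nat → Int × Int
  | [] => (fd, fs)
  | k :: ks =>
      if N ≤ cum.getD k 0 then ((diff.take (k + 1)).sum, cum.getD k 0)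
      else altFind cum diff N fd fs ks

def run_A_B_Test_alt (treatmentSample : List String) (controlSample : List String) (N : Int) (testSuccessVal : String) : Int × Int :=
  let n := min treatmentSample.length controlSample.length
  let succ := (List.range n).map (altS treatmentSample controlSample testSuccessVal)
  let diff := (List.range n).map (altD treatmentSample controlSample testSuccessVal)
  if N ≤ 0 then (0, 0)
  else altFind (altCum succ 0) diff N diff.sum succ.sum (List.range n)

-- ===== PRECONDITION & SPEC =====
def Spec_run_A_B_Test (treatmentSample : List String) (controlSample : List String) (N : Int) (testSuccessVal : String) (out : Int × Int) : Prop := out = run_A_B_Test_alt treatmentSample controlSample N testSuccessVal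
instance (treatmentSample : List String) (controlSample : List String) (N : Int) (testSuccessVal : String) (out : Int × Int) : Decidable (Spec_run_A_B_Test treatmentSample controlSample N testSuccessVal out) := by unfold Spec_run_A_B_Test; infer_instance

-- ===== CLAIM (what is proved, stated in full; the proofs are below) =====
def Claim_equal_run_A_B_Test : Prop := ∀ (treatmentSample : List String) (controlSample : List String) (N : Int) (testSuccessVal : String), Dom_run_A_B_Test treatmentSample controlSample N testSuccessVal → Spec_run_A_B_Test treatmentSample controlSample N testSuccessVal (run_A_B_Test treatmentSample controlSample N testSuccessVal)

-- ===== LEMMAS AND PROOFS =====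

-- prefix sums over the contribution maps
lemma altCum_getD (xs : List Int) (s : Int) (k : Nat) (hk : k < xs.length) :
    (altCum xs s).getD k 0 = s + (xs.take (k + 1)).sum := by
  induction xs generalizing s k with
  | nil => simp at hk
  | cons x xs ih =>
      cases k with
      | zero => simp [altCum]
      | succ k =>
          simp only [altCum, List.getD_cons_succ, List.take_succ_cons, List.sum_cons]
          rw [ih (s + x) k (by simpa using hk)]
          ring

lemma take_map_range {α : Type} (f : Nat → α) (n m : Nat) (h : m ≤ n) :
    ((List.range n).map f).take m = (List.range m).map f := by
  rw [← List.map_take, List.take_range, Nat.min_eq_left h]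

lemma range_succ_sum (f : Nat → Int) (i : Nat) :
    ((List.range (i + 1)).map f).sum = ((List.range i).map f).sum + f i := by
  rw [List.range_succ]; simp

-- one iteration of A's while loop adds exactly B's per-index contributions
lemma runA_step (t c : List String) (N : Int) (v : String) (n i : Nat) (d cnt : Int)
    (h1 : cnt < N) (h2 : i < n) :
    runA_loop t c N v n i d cnt =
    runA_loop t c N v n (i + 1) (d + altD t c v i) (cnt + altS t c v i) := by
  rw [runA_loop]
  rw [dif_pos ⟨h1, h2⟩]
  simp only [altD, altS]
  split_ifs <;> ring_nf

-- the loop exits immediately once the count reaches N (or indices run out)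
lemma runA_stop (t c : List String) (N : Int) (v : String) (n i : Nat) (d cnt : Int)
    (h : ¬(cnt < N ∧ i < n)) :
    runA_loop t c N v n i d cnt = (d, cnt) := by
  rw [runA_loop, dif_neg h]

-- main invariant: from index i with the prefix accumulators, A's loop computes
-- what B's search computes on the remaining indices
lemma loop_eq (t c : List String) (N : Int) (v : String) (n i : Nat)
    (hi : i ≤ n) (hlt : ((List.range i).map (altS t c v)).sum < N) :
    runA_loop t c N v n i
        (((List.range i).map (altD t c v)).sum)
        (((List.range i).map (altS t c v)).sum) =
    altFind (altCum ((List.range n).map (altS t c v)) 0)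
        ((List.range n).map (altD t c v)) N
        (((List.range n).map (altD t c v)).sum)
        (((List.range n).map (altS t c v)).sum)
        (List.range' i (n - i)) := by
  induction hm : n - i generalizing i with
  | zero =>
      have hin : i = n := by omega
      subst hin
      rw [runA_stop _ _ _ _ _ _ _ _ (fun h => absurd h.2 (by omega))]
      simp [altFind]
  | succ m ih =>
      have hin : i < n := by omega
      have hcum : (altCum ((List.range n).map (altS t c v)) 0).getD i 0 =
          ((List.range (i + 1)).map (altS t c v)).sum := by
        rw [altCum_getD _ _ _ (by simpa using hin), take_map_range _ _ _ (by omega)]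
        ring
      rw [List.range'_succ, runA_step _ _ _ _ _ _ _ _ hlt hin,
          ← range_succ_sum (altD t c v) i, ← range_succ_sum (altS t c v) i]
      simp only [altFind, hcum]
      by_cases hge : N ≤ ((List.range (i + 1)).map (altS t c v)).sum
      · rw [if_pos hge, runA_stop _ _ _ _ _ _ _ _ (by omega)]
        rw [take_map_range _ _ _ (by omega)]
      · rw [if_neg hge]
        exact ih (i + 1) (by omega) (by omega) (by omega)


-- ===== VERDICT (by name: the statement is the Claim_ definition above) =====
theorem run_A_B_Test_spec : Claim_equal_run_A_B_Test := by
  intro t c N v _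
  unfold Spec_run_A_B_Test run_A_B_Test run_A_B_Test_alt
  simp only []
  by_cases hN : N ≤ 0
  · rw [if_pos hN, runA_stop _ _ _ _ _ _ _ _ (by omega)]
  · rw [if_neg hN]
    have h := loop_eq t c N v (min t.length c.length) 0 (by omega) (by simp; omega)
    simpa [List.range_eq_range'] using h
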